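-- pv_equiv track=rewrite | github.com/gangadharsingh/20186074_CSPP-1 | cspp1_practice/Odd Tuples Exercise/Odd Tuples Exercise/odd_tuples.py | odd_tuples
-- ===== SOURCE A (Python) =====
-- def odd_tuples(atup_inp):
--     '''
--     aTup: a tuple
--     returns: tuple, every other element of aTup.
--     '''
--     # Your Code Here
--     t_empt = ()
--     j_chec = 0
--     for i_chec in atup_inp:
--         if j_chec % 2 == 0:
--             t_empt = t_empt+ tuple(i_chec)
--         j_chec += 1
--     return t_empt
-- ===== SOURCE B (Python) =====
-- def odd_tuples(atup_inp):
--     '''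
--     aTup: a tuple
--     returns: tuple, every other element of aTup.
--     '''
--     sel = atup_inp[::2]
--     return tuple(x for e in sel for x in e)
-- ===== Notes on version B (the rewrite author's own statement) =====
-- stated objective: simpler
-- what changed: Replaces A's interleaved loop with an index counter, a modulo-parity branch and repeated quadratic tuple concatenation by a two-phase select-then-flatten: a stride slice [::2] picks every other element, then one comprehension flattens the selection in a single linear pass.
import Mathlib
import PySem

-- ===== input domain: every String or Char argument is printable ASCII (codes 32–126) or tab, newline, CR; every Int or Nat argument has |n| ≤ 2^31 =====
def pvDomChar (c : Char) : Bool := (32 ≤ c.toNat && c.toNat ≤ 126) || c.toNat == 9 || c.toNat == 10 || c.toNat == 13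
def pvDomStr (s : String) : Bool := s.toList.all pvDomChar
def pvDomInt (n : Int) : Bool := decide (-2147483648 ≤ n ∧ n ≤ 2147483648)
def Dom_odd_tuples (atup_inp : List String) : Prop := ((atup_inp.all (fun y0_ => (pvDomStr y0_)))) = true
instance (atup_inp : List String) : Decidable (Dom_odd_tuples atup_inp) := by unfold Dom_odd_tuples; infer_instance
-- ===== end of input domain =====

-- B replaces A's index-counter/parity-branch loop with a stride slice [::2] followed by a flatten pass (simpler decomposition).

-- ===== PORT A =====
-- A: one loop over the input with an index counter j_chec, a parity test, and tuple
-- concatenation; tuple(i_chec) of a string is its characters as one-char strings.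
def odd_tuples (atup_inp : List String) : List String :=
  (atup_inp.foldl
    (fun (st : List String × Int) i_chec =>
      (if st.2 % 2 = 0 then st.1 ++ i_chec.toList.map String.singleton else st.1,
       st.2 + 1))
    ([], 0)).1

-- ===== PORT B =====
-- B: sel = atup_inp[::2]; then flatten sel, iterating each selected string character by character.
def odd_tuples_alt (atup_inp : List String) : List String :=
  match PySem.List.slice? atup_inp none none 2 with
  | some sel => sel.flatMap (fun e => e.toList.map String.singleton)
  | none => []

-- ===== PRECONDITION & SPEC =====
def Spec_odd_tuples (atup_inp : List String) (out : List String) : Prop := out = odd_tuples_alt atup_inp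
instance (atup_inp : List String) (out : List String) : Decidable (Spec_odd_tuples atup_inp out) := by unfold Spec_odd_tuples; infer_instance

-- ===== CLAIM (what is proved, stated in full; the proofs are below) =====
def Claim_equal_odd_tuples : Prop := ∀ (atup_inp : List String), Dom_odd_tuples atup_inp → Spec_odd_tuples atup_inp (odd_tuples atup_inp)

-- ===== LEMMAS AND PROOFS =====

/-- Every other element of a list, starting with the first. -/
def pvEveryOther {α : Type} : List α → List α
  | [] => []
  | [x] => [x]
  | x :: _ :: r => x :: pvEveryOther r

/-- A's parity-counting fold is a fold over the every-other subsequence. -/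
theorem pv_foldA {α β : Type} (step : List β → α → List β)
    (xs : List α) (t : List β) (j : Int) (hj : j % 2 = 0) :
    (xs.foldl
      (fun (st : List β × Int) i =>
        (if st.2 % 2 = 0 then step st.1 i else st.1, st.2 + 1)) (t, j)).1
      = (pvEveryOther xs).foldl step t := by
  induction xs using pvEveryOther.induct generalizing t j with
  | case1 => simp [pvEveryOther]
  | case2 x => simp [pvEveryOther, hj]
  | case3 x y r ih =>
    have h1 : (j + 1) % 2 ≠ 0 := by omega
    have h2 : (j + 1 + 1) % 2 = 0 := by omega
    simp only [List.foldl_cons, hj, if_neg h1]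
    simpa [pvEveryOther] using ih (step t x) (j + 1 + 1) h2

/-- Closed form of the stride-2 index enumeration. -/
theorem pv_fmr {α : Type} (xs : List α) :
    (List.range ((xs.length + 1) / 2)).filterMap (fun k => xs[2*k]?) = pvEveryOther xs := by
  induction xs using pvEveryOther.induct with
  | case1 => simp [pvEveryOther]
  | case2 x => simp [pvEveryOther, List.range_succ]
  | case3 x y r ih =>
    have hc : ((x :: y :: r).length + 1) / 2 = (r.length + 1) / 2 + 1 := by
      simp; omega
    rw [hc, List.range_succ_eq_map, List.filterMap_cons, List.filterMap_map]
    simp only [Nat.mul_zero, List.getElem?_cons_zero, Function.comp]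
    have he : (fun k => (x :: y :: r)[2 * Nat.succ k]?) = (fun k => r[2*k]?) := by
      funext k
      have h2 : 2 * Nat.succ k = (2*k) + 1 + 1 := by omega
      rw [h2]; simp
    rw [he, ih]; rfl

/-- xs[::2] selects exactly the every-other subsequence. -/
theorem pv_slice2 {α : Type} (xs : List α) :
    PySem.List.slice? xs none none 2 = some (pvEveryOther xs) := by
  have h := pv_fmr xs
  simp only [PySem.List.slice?, PySem.List.sliceIndices]
  norm_num
  have hcount : (if 0 < xs.length then (((xs.length : Int) + 2 - 1) / 2).toNat else 0) = (xs.length + 1) / 2 := by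
    split_ifs with hl
    · omega
    · omega
  rw [hcount]
  have he : (fun (k : Nat) => xs[(2 * (k : Int)).toNat]?) = (fun k => xs[2*k]?) := by
    funext k
    congr 1
  rw [he, h]

-- ===== VERDICT (by name: the statement is the Claim_ definition above) =====
theorem odd_tuples_spec : Claim_equal_odd_tuples := by
  intro atup_inp _
  unfold Spec_odd_tuples odd_tuples odd_tuples_alt
  rw [pv_slice2]
  rw [pv_foldA (fun t i => t ++ i.toList.map String.singleton) atup_inp [] 0 rfl]
  simp [List.flatMap]
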